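-- pv_equiv track=rewrite | github.com/Jai-12-cpu/Cyberventure | game.py | game_24_check_operation
-- ===== SOURCE A (Python) =====
-- def game_24_check_operation(oper):
--     allowed = "1234567890+-*/() "
--     is_number = False
--
--     for i in oper:
--         if i not in allowed:
--             return False
--         try:
--             int(i)
--             if is_number:
--                 return False  # prevent number concatenation
--             is_number = True
--         except ValueError:
--             is_number = False
--
--     return True
-- ===== SOURCE B (Python) =====
-- def game_24_check_operation(oper):
--     allowed = set("1234567890+-*/() ")
--     digits = set("1234567890")
--     if not all(c in allowed for c in oper):
--         return False
--     return not any(a in digits and b in digits for a, b in zip(oper, oper[1:]))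
-- ===== Notes on version B (the rewrite author's own statement) =====
-- stated objective: simpler
-- what changed: Replaces A's single stateful loop (is_number flag plus try/except int()) with two independent stateless passes: an all-characters-allowed check followed by a pairwise zip scan for two adjacent digits.
import Mathlib
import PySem

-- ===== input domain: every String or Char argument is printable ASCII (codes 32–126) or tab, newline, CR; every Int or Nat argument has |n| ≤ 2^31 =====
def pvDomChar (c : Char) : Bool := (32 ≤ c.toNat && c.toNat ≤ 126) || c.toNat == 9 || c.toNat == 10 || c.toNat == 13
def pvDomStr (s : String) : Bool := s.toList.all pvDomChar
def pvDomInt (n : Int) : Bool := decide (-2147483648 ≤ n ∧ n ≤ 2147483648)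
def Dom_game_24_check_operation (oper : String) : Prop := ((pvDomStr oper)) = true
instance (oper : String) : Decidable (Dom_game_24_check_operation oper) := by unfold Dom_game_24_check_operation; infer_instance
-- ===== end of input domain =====

-- B replaces A's single stateful loop (is_number flag + try/except) with two independent
-- stateless passes: an allowed-character check, then a pairwise adjacent-digit scan (simpler).


-- ===== PORT A =====
-- allowed = "1234567890+-*/() "
def pvAllowedA : List Char := "1234567890+-*/() ".toList
-- int(i) on a single character of `allowed` succeeds exactly when i is one of '0'..'9'
-- ('+', '-', '*', '/', '(', ')', ' ' all raise ValueError); exact on that domain.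
def pvDigitA : List Char := "1234567890".toList
-- the for-loop over oper with the is_number flag, early returns kept as returns of false
def pvLoopA : List Char → Bool → Bool
  | [], _ => true
  | c :: t, isNum =>
    if ¬ (pvAllowedA.contains c) then false
    else if pvDigitA.contains c then
      (if isNum then false else pvLoopA t true)
    else pvLoopA t false

def game_24_check_operation (oper : String) : Bool :=
  pvLoopA oper.toList false

-- ===== PORT B =====
def pvAllowedB : List Char := "1234567890+-*/() ".toList
def pvDigitB : List Char := "1234567890".toList

def game_24_check_operation_alt (oper : String) : Bool :=
  let cs := oper.toList
  if ¬ (cs.all (fun c => pvAllowedB.contains c)) then false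
  else ! ((cs.zip cs.tail).any (fun p => pvDigitB.contains p.1 && pvDigitB.contains p.2))

-- ===== PRECONDITION & SPEC =====
def Spec_game_24_check_operation (oper : String) (out : Bool) : Prop := out = game_24_check_operation_alt oper
instance (oper : String) (out : Bool) : Decidable (Spec_game_24_check_operation oper out) := by unfold Spec_game_24_check_operation; infer_instance

-- ===== CLAIM (what is proved, stated in full; the proofs are below) =====
def Claim_equal_game_24_check_operation : Prop := ∀ (oper : String), Dom_game_24_check_operation oper → Spec_game_24_check_operation oper (game_24_check_operation oper)

-- ===== LEMMAS AND PROOFS =====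

theorem pvAB : pvAllowedB = pvAllowedA := rfl
theorem pvDB : pvDigitB = pvDigitA := rfl

-- whether the first character of a list is a digit
def pvHeadDigit : List Char → Bool
  | [] => false
  | c :: _ => pvDigitA.contains c

-- "no two adjacent digits" in B's zip formulation (stated over A's identical constants)
def pvNoAdj (cs : List Char) : Bool :=
  ! ((cs.zip cs.tail).any (fun p => pvDigitA.contains p.1 && pvDigitA.contains p.2))

theorem pvNoAdj_cons (c : Char) (t : List Char) :
    pvNoAdj (c :: t) = (!(pvDigitA.contains c && pvHeadDigit t) && pvNoAdj t) := by
  cases t with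
  | nil => simp [pvNoAdj, pvHeadDigit]
  | cons d t' =>
    simp only [pvNoAdj, pvHeadDigit, List.tail_cons, List.zip_cons_cons, List.any_cons,
      Bool.not_or]

theorem pvHeadDigit_cons (c : Char) (t : List Char) :
    pvHeadDigit (c :: t) = pvDigitA.contains c := rfl

theorem pvLoopA_eq (cs : List Char) : ∀ b : Bool,
    pvLoopA cs b =
      (cs.all (fun c => pvAllowedA.contains c) && !(b && pvHeadDigit cs) && pvNoAdj cs) := by
  induction cs with
  | nil => intro b; simp [pvLoopA, pvNoAdj, pvHeadDigit]
  | cons c t ih =>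
    intro b
    rw [pvNoAdj_cons, pvHeadDigit_cons]
    simp only [pvLoopA, List.all_cons]
    cases hA : pvAllowedA.contains c with
    | false => simp
    | true =>
      cases hD : pvDigitA.contains c with
      | false =>
        simp [ih]
      | true =>
        cases b with
        | true => simp
        | false =>
          simp [ih]
          cases pvHeadDigit t <;> cases pvNoAdj t <;>
            cases t.all (fun c => pvAllowedA.contains c) <;> simp_all

-- ===== VERDICT (by name: the statement is the Claim_ definition above) =====
theorem game_24_check_operation_spec : Claim_equal_game_24_check_operation := by
  intro oper _
  unfold Spec_game_24_check_operation game_24_check_operation game_24_check_operation_alt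
  rw [pvLoopA_eq]
  simp only [pvAB, pvDB]
  cases h : (oper.toList.all fun c => pvAllowedA.contains c) with
  | false => simp
  | true =>
    simp [pvNoAdj]
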